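-- pv_equiv track=rewrite | github.com/fran-veiga/Lexer | automatas/finsi.py | afd_finsi
-- ===== SOURCE A (Python) =====
-- def afd_finsi(lexema):
--     tabla_transicion={
--         'A':{'f':'B'},
--         'B':{'i':'C'},
--         'C':{'n':'D'},
--         'D':{'s':'E'},
--         'E':{'i':'F'},
--         'F':{},
--         'T':{}
--         }
--
--     estado_actual = "A"
--     estados_finales = ["F"]
--
--     for c in lexema:
--         if c in tabla_transicion[estado_actual]:
--             estado_actual = tabla_transicion[estado_actual][c]
--         else:
--             estado_actual = 'T'
--             break
--     if estado_actual in estados_finales: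
--         return "FINAL"
--     elif estado_actual == 'T':
--         return "TRAMPA"
--     else:
--         return "NO FINAL"
-- ===== SOURCE B (Python) =====
-- def afd_finsi(lexema):
--     palabra = 'finsi'
--     if lexema == palabra:
--         return "FINAL"
--     elif palabra.startswith(lexema):
--         return "NO FINAL"
--     else:
--         return "TRAMPA"
-- ===== Notes on version B (the rewrite author's own statement) =====
-- stated objective: simpler
-- what changed: Replaced the hand-written transition table and per-character DFA loop with a direct comparison against the constant word 'finsi': exact match -> FINAL, proper prefix -> NO FINAL, anything else -> TRAMPA.
import Mathlib
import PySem

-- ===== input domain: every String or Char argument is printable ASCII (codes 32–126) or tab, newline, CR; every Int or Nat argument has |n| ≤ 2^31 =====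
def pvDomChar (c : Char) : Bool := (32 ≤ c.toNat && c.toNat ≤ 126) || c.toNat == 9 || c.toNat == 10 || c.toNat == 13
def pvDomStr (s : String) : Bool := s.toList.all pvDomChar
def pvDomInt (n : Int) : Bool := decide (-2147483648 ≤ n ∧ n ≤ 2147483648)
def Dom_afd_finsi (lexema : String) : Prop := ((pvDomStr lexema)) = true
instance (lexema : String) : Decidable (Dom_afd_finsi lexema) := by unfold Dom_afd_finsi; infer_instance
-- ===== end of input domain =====

-- B replaces A's transition table and per-character DFA loop by a direct
-- equality/prefix comparison against the constant word "finsi" (objective: simpler).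

-- ===== PORT A =====
-- the dict-of-dicts literal tabla_transicion
def tabla_transicion : PySem.Dict String (PySem.Dict Char String) :=
  PySem.Dict.ofList
    [ ("A", PySem.Dict.ofList [('f', "B")])
    , ("B", PySem.Dict.ofList [('i', "C")])
    , ("C", PySem.Dict.ofList [('n', "D")])
    , ("D", PySem.Dict.ofList [('s', "E")])
    , ("E", PySem.Dict.ofList [('i', "F")])
    , ("F", PySem.Dict.ofList [])
    , ("T", PySem.Dict.ofList []) ]

-- the 'for c in lexema' loop; every reachable estado_actual is a key of the table,
-- so the .getD Dict.empty fallback of tabla_transicion[estado_actual] is never taken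
def afd_finsi_loop (estado_actual : String) (cs : List Char) : String :=
  match cs with
  | [] => estado_actual
  | c :: rest =>
      let fila := (tabla_transicion.get? estado_actual).getD PySem.Dict.empty
      match fila.get? c with
      | some s => afd_finsi_loop s rest
      | none => "T"          -- estado_actual = 'T'; break

def afd_finsi (lexema : String) : String :=
  let estado_actual := afd_finsi_loop "A" lexema.toList
  let estados_finales : List String := ["F"]
  if estado_actual ∈ estados_finales then "FINAL"
  else if estado_actual = "T" then "TRAMPA"
  else "NO FINAL"

-- ===== PORT B =====
def afd_finsi_alt (lexema : String) : String :=
  let palabra := "finsi"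
  if lexema = palabra then "FINAL"
  else if PySem.Str.startswith palabra lexema then "NO FINAL"
  else "TRAMPA"

-- ===== PRECONDITION & SPEC =====
def Spec_afd_finsi (lexema : String) (out : String) : Prop := out = afd_finsi_alt lexema
instance (lexema : String) (out : String) : Decidable (Spec_afd_finsi lexema out) := by unfold Spec_afd_finsi; infer_instance

-- ===== CLAIM (what is proved, stated in full; the proofs are below) =====
def Claim_equal_afd_finsi : Prop := ∀ (lexema : String), Dom_afd_finsi lexema → Spec_afd_finsi lexema (afd_finsi lexema)

-- ===== LEMMAS AND PROOFS =====

-- (state, remaining suffix of "finsi") pairs the loop can be in (proof bookkeeping)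
def pvPairs : List (String × List Char) :=
  [ ("A", ['f','i','n','s','i'])
  , ("B", ['i','n','s','i'])
  , ("C", ['n','s','i'])
  , ("D", ['s','i'])
  , ("E", ['i'])
  , ("F", []) ]

-- looking up a one-entry row of the table
lemma pv_get_single (k : Char) (v : String) (c : Char) :
    (PySem.Dict.ofList [(k, v)]).get? c = if c = k then some v else none := by
  show (PySem.Dict.empty.insert k v).get? c = _
  rw [PySem.Dict.get?_insert]; rfl

-- one step of the loop from each live state
lemma pv_loopA (c : Char) (rest : List Char) :
    afd_finsi_loop "A" (c :: rest) = if c = 'f' then afd_finsi_loop "B" rest else "T" := by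
  show (match (PySem.Dict.ofList [('f', "B")]).get? c with
        | some s => afd_finsi_loop s rest | none => "T") = _
  rw [pv_get_single]; split_ifs <;> rfl

lemma pv_loopB (c : Char) (rest : List Char) :
    afd_finsi_loop "B" (c :: rest) = if c = 'i' then afd_finsi_loop "C" rest else "T" := by
  show (match (PySem.Dict.ofList [('i', "C")]).get? c with
        | some s => afd_finsi_loop s rest | none => "T") = _
  rw [pv_get_single]; split_ifs <;> rfl

lemma pv_loopC (c : Char) (rest : List Char) :
    afd_finsi_loop "C" (c :: rest) = if c = 'n' then afd_finsi_loop "D" rest else "T" := by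
  show (match (PySem.Dict.ofList [('n', "D")]).get? c with
        | some s => afd_finsi_loop s rest | none => "T") = _
  rw [pv_get_single]; split_ifs <;> rfl

lemma pv_loopD (c : Char) (rest : List Char) :
    afd_finsi_loop "D" (c :: rest) = if c = 's' then afd_finsi_loop "E" rest else "T" := by
  show (match (PySem.Dict.ofList [('s', "E")]).get? c with
        | some s => afd_finsi_loop s rest | none => "T") = _
  rw [pv_get_single]; split_ifs <;> rfl

lemma pv_loopE (c : Char) (rest : List Char) :
    afd_finsi_loop "E" (c :: rest) = if c = 'i' then afd_finsi_loop "F" rest else "T" := by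
  show (match (PySem.Dict.ofList [('i', "F")]).get? c with
        | some s => afd_finsi_loop s rest | none => "T") = _
  rw [pv_get_single]; split_ifs <;> rfl

lemma pv_loopF (c : Char) (rest : List Char) : afd_finsi_loop "F" (c :: rest) = "T" := rfl

-- classifying the loop's result from a live state equals the equality/prefix test
-- against that state's remaining suffix of "finsi"
lemma pv_loop_classify (cs : List Char) :
    ∀ st w, (st, w) ∈ pvPairs →
      (if afd_finsi_loop st cs ∈ ["F"] then "FINAL"
       else if afd_finsi_loop st cs = "T" then "TRAMPA"
       else "NO FINAL")
      = (if cs = w then "FINAL" else if cs <+: w then "NO FINAL" else "TRAMPA") := by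
  induction cs with
  | nil =>
    intro st w h
    fin_cases h <;> simp [afd_finsi_loop]
  | cons c rest ih =>
    intro st w h
    fin_cases h
    · rw [pv_loopA]
      by_cases hc : c = 'f'
      · simpa [hc, List.cons_prefix_cons] using ih "B" ['i','n','s','i'] (by simp [pvPairs])
      · simp [hc, List.cons_prefix_cons]
    · rw [pv_loopB]
      by_cases hc : c = 'i'
      · simpa [hc, List.cons_prefix_cons] using ih "C" ['n','s','i'] (by simp [pvPairs])
      · simp [hc, List.cons_prefix_cons]
    · rw [pv_loopC]
      by_cases hc : c = 'n'
      · simpa [hc, List.cons_prefix_cons] using ih "D" ['s','i'] (by simp [pvPairs])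
      · simp [hc, List.cons_prefix_cons]
    · rw [pv_loopD]
      by_cases hc : c = 's'
      · simpa [hc, List.cons_prefix_cons] using ih "E" ['i'] (by simp [pvPairs])
      · simp [hc, List.cons_prefix_cons]
    · rw [pv_loopE]
      by_cases hc : c = 'i'
      · simpa [hc, List.cons_prefix_cons] using ih "F" [] (by simp [pvPairs])
      · simp [hc, List.cons_prefix_cons]
    · rw [pv_loopF]
      simp

-- ===== VERDICT (by name: the statement is the Claim_ definition above) =====
theorem afd_finsi_spec : Claim_equal_afd_finsi := by
  intro lexema _
  unfold Spec_afd_finsi afd_finsi afd_finsi_alt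
  have h := pv_loop_classify lexema.toList "A" ['f','i','n','s','i'] (by simp [pvPairs])
  simp only [] at h ⊢
  rw [h]
  have heq : (lexema = "finsi") ↔ lexema.toList = ['f','i','n','s','i'] := by
    constructor
    · intro h'; rw [h']; rfl
    · intro h'
      have : lexema.toList = ("finsi" : String).toList := h'
      exact String.toList_injective this
  by_cases h1 : lexema = "finsi"
  · simp [h1]
  · have h1' : ¬ lexema.toList = ['f','i','n','s','i'] := fun hh => h1 (heq.mpr hh)
    by_cases h2 : lexema.toList <+: ['f','i','n','s','i']
    · have hb : PySem.Chars.startswith ['f','i','n','s','i'] lexema.toList = true :=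
        (PySem.Chars.startswith_iff _ _).mpr h2
      simp [h1, h1', h2, hb]
    · have hb : PySem.Chars.startswith ['f','i','n','s','i'] lexema.toList = false := by
        rw [Bool.eq_false_iff]
        intro hx; exact h2 ((PySem.Chars.startswith_iff _ _).mp hx)
      simp [h1, h1', h2, hb]
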